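-- pv_equiv track=rewrite | github.com/mahnoor-shahid/CraftingLab | LeetCode/Arrays_and_Hashmaps/contains-duplicate.py | containsDuplicate_with_set
-- ===== SOURCE A (Python) =====
-- from typing import List
--
-- def containsDuplicate_with_set(nums: List[int]) -> bool:
--     hashmap = set() ## space complexity increases from 1 to n
--     for n in nums: ## since there is no sorting time complexity is n
--         if n in hashmap:
--             return True
--         else:
--             hashmap.add(n)
--     return False
-- ===== SOURCE B (Python) =====
-- from typing import List
--
-- def containsDuplicate_with_set(nums: List[int]) -> bool:
--     s = sorted(nums)
--     return any(a == b for a, b in zip(s, s[1:]))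
-- ===== Notes on version B (the rewrite author's own statement) =====
-- stated objective: alternative
-- what changed: Replaces the hash-set early-exit loop by sorting the list and scanning adjacent pairs for an equal neighbour; no set is built at all.
import Mathlib
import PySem

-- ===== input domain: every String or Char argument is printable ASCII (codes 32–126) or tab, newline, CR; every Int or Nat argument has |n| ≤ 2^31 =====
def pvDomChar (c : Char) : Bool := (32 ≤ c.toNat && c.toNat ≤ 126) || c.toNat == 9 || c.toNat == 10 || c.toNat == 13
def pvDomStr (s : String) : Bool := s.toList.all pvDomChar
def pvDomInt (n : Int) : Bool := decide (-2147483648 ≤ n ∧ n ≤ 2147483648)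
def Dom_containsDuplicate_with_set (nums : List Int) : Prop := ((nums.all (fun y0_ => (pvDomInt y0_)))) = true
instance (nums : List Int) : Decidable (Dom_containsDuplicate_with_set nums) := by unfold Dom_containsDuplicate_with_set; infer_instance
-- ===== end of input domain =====

-- B replaces A's hash-set early-exit loop by sorting and scanning adjacent pairs (alternative algorithm).

-- ===== PORT A =====
-- the 'for n in nums' loop with early 'return True', carrying the growing set 'hashmap'
def cdLoop (hashmap : PySem.Set Int) : List Int → Bool
  | [] => false
  | n :: rest =>
      if PySem.Set.contains hashmap n then true
      else cdLoop (PySem.Set.add hashmap n) rest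

def containsDuplicate_with_set (nums : List Int) : Bool :=
  cdLoop PySem.Set.empty nums

-- ===== PORT B =====
-- s = sorted(nums); return any(a == b for a, b in zip(s, s[1:]))
def containsDuplicate_with_set_alt (nums : List Int) : Bool :=
  let s := PySem.List.sorted nums (fun x => x) false
  (s.zip s.tail).any (fun p => p.1 == p.2)

-- ===== PRECONDITION & SPEC =====
def Spec_containsDuplicate_with_set (nums : List Int) (out : Bool) : Prop := out = containsDuplicate_with_set_alt nums
instance (nums : List Int) (out : Bool) : Decidable (Spec_containsDuplicate_with_set nums out) := by unfold Spec_containsDuplicate_with_set; infer_instance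

-- ===== CLAIM (what is proved, stated in full; the proofs are below) =====
def Claim_equal_containsDuplicate_with_set : Prop := ∀ (nums : List Int), Dom_containsDuplicate_with_set nums → Spec_containsDuplicate_with_set nums (containsDuplicate_with_set nums)

-- ===== LEMMAS AND PROOFS =====

-- A's loop returns false exactly when the remaining list is duplicate-free and disjoint from the set so far
theorem cdLoop_false_iff (ns : List Int) (s : PySem.Set Int) :
    cdLoop s ns = false ↔ ns.Nodup ∧ ∀ x ∈ ns, x ∉ s := by
  induction ns generalizing s with
  | nil => simp [cdLoop]
  | cons n rest ih =>
      by_cases h : n ∈ s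
      · have hc : PySem.Set.contains s n = true := by simp [h]
        simp [cdLoop, h]
      · have hc : PySem.Set.contains s n = false := by simp [h]
        rw [show cdLoop s (n :: rest) = cdLoop (PySem.Set.add s n) rest by
              simp only [cdLoop, hc, Bool.false_eq_true, if_false]]
        rw [ih]
        simp only [List.nodup_cons, List.mem_cons]
        constructor
        · rintro ⟨hnd, hdisj⟩
          have hn : n ∉ rest := fun hnr =>
            (hdisj n hnr) (by simp [PySem.Set.mem_add])
          refine ⟨⟨hn, hnd⟩, ?_⟩
          rintro x (rfl | hx)
          · exact h
          · intro hxs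
            exact hdisj x hx (by simp [PySem.Set.mem_add, hxs])
        · rintro ⟨⟨hn, hnd⟩, hdisj⟩
          refine ⟨hnd, fun x hx hxs => ?_⟩
          rw [PySem.Set.mem_add] at hxs
          rcases hxs with hxs | rfl
          · exact hdisj x (Or.inr hx) hxs
          · exact hn hx

-- zip-with-tail adjacent-equality scan is false iff the list is an (adjacent-)distinct chain
theorem zipAny_false_iff (l : List Int) :
    ((l.zip l.tail).any (fun p => p.1 == p.2) = false) ↔ l.IsChain (· ≠ ·) := by
  induction l with
  | nil => simp
  | cons a t ih =>
      cases t with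
      | nil => simp
      | cons b u =>
          rw [show (a :: b :: u).tail = b :: u from rfl, List.zip_cons_cons,
            List.any_cons, List.isChain_cons_cons, ← ih]
          simp [beq_eq_false_iff_ne]

-- adjacent-distinct plus adjacent-≤ gives adjacent-<
theorem chain_ne_le_lt : ∀ (l : List Int), l.IsChain (· ≠ ·) → l.IsChain (· ≤ ·) → l.IsChain (· < ·)
  | [], _, _ => List.IsChain.nil
  | [_], _, _ => List.isChain_singleton _
  | a :: b :: u, hne, hle => by
      rw [List.isChain_cons_cons] at hne hle ⊢
      exact ⟨lt_of_le_of_ne hle.1 hne.1, chain_ne_le_lt (b :: u) hne.2 hle.2⟩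

-- a duplicate-free list is adjacent-distinct
theorem nodup_chain_ne : ∀ (l : List Int), l.Nodup → l.IsChain (· ≠ ·)
  | [], _ => List.IsChain.nil
  | [_], _ => List.isChain_singleton _
  | a :: b :: u, h => by
      rw [List.nodup_cons] at h
      rw [List.isChain_cons_cons]
      exact ⟨fun hab => h.1 (hab ▸ List.mem_cons_self), nodup_chain_ne (b :: u) h.2⟩

-- for a ≤-sorted list, adjacent-distinct is exactly Nodup
theorem chain_ne_iff_nodup (l : List Int) (hs : l.Pairwise (· ≤ ·)) :
    l.IsChain (· ≠ ·) ↔ l.Nodup := by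
  constructor
  · intro hc
    exact (chain_ne_le_lt l hc (List.isChain_iff_pairwise.mpr hs)).pairwise.nodup
  · exact nodup_chain_ne l

-- ===== VERDICT (by name: the statement is the Claim_ definition above) =====
theorem containsDuplicate_with_set_spec : Claim_equal_containsDuplicate_with_set := by
  intro nums _
  unfold Spec_containsDuplicate_with_set containsDuplicate_with_set containsDuplicate_with_set_alt
  set s := PySem.List.sorted nums (fun x => x) false with hsdef
  have hperm : s.Perm nums := PySem.List.sorted_perm nums (fun x => x) false
  have hpw : s.Pairwise (· ≤ ·) := by
    simpa using PySem.List.sorted_pairwise (xs := nums) (key := fun x => x)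
  rcases h : (s.zip s.tail).any (fun p => p.1 == p.2) with _ | _
  · -- B says no duplicates: s is Nodup, hence nums is, hence A's loop returns false
    have hnd : nums.Nodup :=
      hperm.nodup_iff.mp ((chain_ne_iff_nodup s hpw).mp ((zipAny_false_iff s).mp h))
    exact (cdLoop_false_iff nums PySem.Set.empty).mpr ⟨hnd, by simp [PySem.Set.empty]⟩
  · -- B says duplicate: nums not Nodup, so A's loop cannot return false
    have hnnd : ¬ nums.Nodup := by
      intro hnd
      have : (s.zip s.tail).any (fun p => p.1 == p.2) = false :=
        (zipAny_false_iff s).mpr ((chain_ne_iff_nodup s hpw).mpr (hperm.nodup_iff.mpr hnd))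
      simp [h] at this
    rcases hA : cdLoop PySem.Set.empty nums with _ | _
    · exact absurd ((cdLoop_false_iff nums PySem.Set.empty).mp hA).1 hnnd
    · rfl
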